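-- pv_equiv track=rewrite | github.com/FrenchBear/Python | Learning/173_Factions/fr.py | get_fraction_count_series
-- ===== SOURCE A (Python) =====
-- import math
--
-- def get_fraction_count_series(limit: int) -> list[int]:
--     """Returns a list of counts of simplified fractions for MAX varying from 1 to limit."""
--     counts = []
--     total_fractions = 0
--
--     for d in range(1, limit + 1):
--         # Calculate Euler's totient function phi(d) for n < d
--         # We want 0 < n < d, so for d=1 there are no such n.
--         phi = 0
--         for n in range(1, d):
--             if math.gcd(n, d) == 1:
--                 phi += 1
--
--         total_fractions += phi
--         counts.append(total_fractions)
--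
--     return counts
-- ===== SOURCE B (Python) =====
-- def get_fraction_count_series(limit: int) -> list[int]:
--     """Returns a list of counts of simplified fractions for MAX varying from 1 to limit.
--
--     Divisor-sum sieve: using sum_{d|n} phi(d) = n, phi[n] is obtained by
--     subtracting phi[d] from every proper multiple of d, then prefix-summed.
--     """
--     if limit < 1:
--         return []
--     phi = list(range(limit + 1))
--     for d in range(1, limit + 1):
--         for q in range(2, limit // d + 1):
--             phi[q * d] -= phi[d]
--     counts = []
--     total = 0
--     for d in range(2, limit + 1):
--         total += phi[d]
--         counts.append(total)
--     return [0] + counts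
-- ===== Notes on version B (the rewrite author's own statement) =====
-- stated objective: faster
-- what changed: Replaces the per-denominator gcd scan with a divisor-sum sieve (phi[m] -= phi[d] for every proper multiple m of d, using sum_{d|n} phi(d) = n) followed by a prefix sum.
import Mathlib
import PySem

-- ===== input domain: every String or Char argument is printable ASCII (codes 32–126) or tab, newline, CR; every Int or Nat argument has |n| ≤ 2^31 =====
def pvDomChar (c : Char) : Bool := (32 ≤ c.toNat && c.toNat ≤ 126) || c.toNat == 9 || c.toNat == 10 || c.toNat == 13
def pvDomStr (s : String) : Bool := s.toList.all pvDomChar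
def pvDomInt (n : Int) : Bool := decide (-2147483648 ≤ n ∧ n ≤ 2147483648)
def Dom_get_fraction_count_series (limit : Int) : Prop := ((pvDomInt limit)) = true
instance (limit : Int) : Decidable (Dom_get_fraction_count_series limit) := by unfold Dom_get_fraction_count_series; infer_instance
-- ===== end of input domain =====

-- B replaces A's per-denominator gcd scan by a divisor-sum totient sieve plus a prefix sum (objective: faster).

-- ===== PORT A =====
def get_fraction_count_series (limit : Int) : List Int :=
  ((PySem.List.pyRange 1 (limit + 1) 1).foldl
    (fun (st : List Int × Int) d =>
      let phi := (PySem.List.pyRange 1 d 1).foldl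
        (fun phi n => if Int.gcd n d = 1 then phi + 1 else phi) (0 : Int)
      let total := st.2 + phi
      (st.1 ++ [total], total)) (([] : List Int), (0 : Int))).1

-- ===== PORT B =====
-- inner loop 'for q in range(2, limit // d + 1): phi[q*d] -= phi[d]'
def pvSubMultiples (limit : Int) (phi : List Int) (d : Int) : List Int :=
  (PySem.List.pyRange 2 (PySem.Int.floordiv limit d + 1) 1).foldl
    (fun phi q =>
      PySem.List.pySetD phi (q * d) (PySem.List.pyGetD phi (q * d) 0 - PySem.List.pyGetD phi d 0))
    phi

def get_fraction_count_series_alt (limit : Int) : List Int :=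
  if limit < 1 then []
  else
    let phi := (PySem.List.pyRange 1 (limit + 1) 1).foldl (pvSubMultiples limit)
      (PySem.List.pyRange 0 (limit + 1) 1)
    let counts := ((PySem.List.pyRange 2 (limit + 1) 1).foldl
      (fun (st : List Int × Int) d =>
        let total := st.2 + PySem.List.pyGetD phi d 0
        (st.1 ++ [total], total)) (([] : List Int), (0 : Int))).1
    [0] ++ counts

-- ===== PRECONDITION & SPEC =====
def Spec_get_fraction_count_series (limit : Int) (out : List Int) : Prop := out = get_fraction_count_series_alt limit
instance (limit : Int) (out : List Int) : Decidable (Spec_get_fraction_count_series limit out) := by unfold Spec_get_fraction_count_series; infer_instance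

-- ===== CLAIM (what is proved, stated in full; the proofs are below) =====
def Claim_equal_get_fraction_count_series : Prop := ∀ (limit : Int), Dom_get_fraction_count_series limit → Spec_get_fraction_count_series limit (get_fraction_count_series limit)

-- ===== LEMMAS AND PROOFS =====

theorem card_filter_countP (q : ℕ → Prop) [DecidablePred q] (n : ℕ) :
    ((Finset.range n).filter q).card = (List.range n).countP (fun k => decide (q k)) := by
  induction n with
  | zero => rfl
  | succ n ih =>
    rw [Finset.range_add_one, List.range_succ, Finset.filter_insert, List.countP_append]
    by_cases h : q n
    · rw [if_pos h, Finset.card_insert_of_notMem (by simp), ih]; simp [h]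
    · rw [if_neg h, ih]; simp [h]

-- A's inner gcd-counting loop computes the totient (for d ≥ 2)
theorem countA_eq (dn : ℕ) (hd : 2 ≤ dn) :
    (PySem.List.pyRange 1 (dn : Int) 1).foldl
        (fun phi n => if Int.gcd n (dn : Int) = 1 then phi + 1 else phi) (0 : Int)
      = (Nat.totient dn : Int) := by
  rw [PySem.List.pyRange_one, List.foldl_map, PySem.List.foldl_ite_add_one, zero_add]
  rw [Nat.totient, card_filter_countP]
  norm_cast
  have ht : (Int.subNatNat dn 1).toNat = dn - 1 := by rw [Int.subNatNat_eq_coe]; omega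
  rw [ht]
  obtain ⟨t, rfl⟩ : ∃ t, dn = t + 1 := ⟨dn - 1, by omega⟩
  rw [Nat.add_sub_cancel, List.range_succ_eq_map, List.countP_cons, List.countP_map]
  have h0 : (decide ((t + 1).Coprime 0)) = false := by simp [Nat.Coprime]; omega
  rw [h0]
  have hfun : ((fun k => decide ((t + 1).Coprime k)) ∘ Nat.succ) =
      (fun x : ℕ => decide (Nat.gcd (1 + x) (t + 1) = 1)) := by
    funext k
    simp only [Function.comp, Nat.Coprime, decide_eq_decide]
    rw [Nat.gcd_comm]
    simp [Nat.succ_eq_add_one, Nat.add_comm]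
  rw [hfun]
  simp

-- the generalized inner loop: q runs over 2..t
def pvSubFold (phi : List Int) (dn t : ℕ) : List Int :=
  (PySem.List.pyRange 2 ((t : Int) + 1) 1).foldl
    (fun phi q =>
      PySem.List.pySetD phi (q * (dn : Int)) (PySem.List.pyGetD phi (q * (dn : Int)) 0 - PySem.List.pyGetD phi (dn : Int) 0))
    phi

theorem pvSubMultiples_eq_subFold (L : ℕ) (phi : List Int) (dn : ℕ) :
    pvSubMultiples (L : Int) phi (dn : Int) = pvSubFold phi dn (L / dn) := by
  unfold pvSubMultiples pvSubFold
  rw [PySem.Int.floordiv_natCast]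

theorem pvSubFold_zero (phi : List Int) (dn : ℕ) : pvSubFold phi dn 0 = phi := by
  unfold pvSubFold
  rw [PySem.List.pyRange_one_eq_nil (a := 2) (by simp)]; rfl

theorem pvSubFold_one (phi : List Int) (dn : ℕ) : pvSubFold phi dn 1 = phi := by
  unfold pvSubFold
  rw [PySem.List.pyRange_one_eq_nil (a := 2) (by simp)]; rfl

theorem pvSubFold_succ (phi : List Int) (dn t : ℕ) (ht : 1 ≤ t) :
    pvSubFold phi dn (t + 1) =
      (fun phi q =>
        PySem.List.pySetD phi (q * (dn : Int)) (PySem.List.pyGetD phi (q * (dn : Int)) 0 - PySem.List.pyGetD phi (dn : Int) 0))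
        (pvSubFold phi dn t) ((t : Int) + 1) := by
  unfold pvSubFold
  have h1 : ((t + 1 : ℕ) : Int) + 1 = ((t : Int) + 1) + 1 := by push_cast; ring
  rw [h1, PySem.List.pyRange_one_succ_right (a := 2) (b := (t : Int) + 1) (by omega), List.foldl_append]
  rfl

theorem pvSubFold_length (phi : List Int) (dn t : ℕ) :
    (pvSubFold phi dn t).length = phi.length := by
  induction t with
  | zero => rw [pvSubFold_zero]
  | succ t ih =>
    rcases Nat.eq_zero_or_pos t with h | h
    · subst h; rw [pvSubFold_one]
    · rw [pvSubFold_succ phi dn t h]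
      simp only [PySem.List.length_pySetD, ih]

theorem pvSubFold_getD (L : ℕ) (phi : List Int) (hlen : phi.length = L + 1)
    (dn : ℕ) (hd : 1 ≤ dn) (t : ℕ) (htd : t * dn ≤ L) :
    ∀ m, m ≤ L → (pvSubFold phi dn t).getD m 0 =
      if dn ∣ m ∧ 2 * dn ≤ m ∧ m ≤ t * dn then phi.getD m 0 - phi.getD dn 0 else phi.getD m 0 := by
  induction t with
  | zero =>
    intro m hm
    rw [pvSubFold_zero, if_neg]
    rintro ⟨-, h2, h3⟩; omega
  | succ t ih =>
    intro m hm
    rcases Nat.eq_zero_or_pos t with h | h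
    · subst h
      rw [pvSubFold_one, if_neg]
      rintro ⟨-, h2, h3⟩; omega
    · have htd' : t * dn ≤ L := le_trans (by nlinarith) htd
      have ih := ih htd'
      rw [pvSubFold_succ phi dn t h]
      simp only
      have hc : ((t : Int) + 1) * (dn : Int) = (((t + 1) * dn : ℕ) : Int) := by push_cast; ring
      rw [hc, PySem.List.pySetD_natCast, PySem.List.pyGetD_natCast, PySem.List.pyGetD_natCast]
      have hmL : (t + 1) * dn ≤ L := htd
      have hψlen : (pvSubFold phi dn t).length = L + 1 := by rw [pvSubFold_length, hlen]
      have hψd : (pvSubFold phi dn t).getD dn 0 = phi.getD dn 0 := by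
        rw [ih dn (by nlinarith), if_neg]
        rintro ⟨-, h2, -⟩; omega
      have hψm : (pvSubFold phi dn t).getD ((t + 1) * dn) 0 = phi.getD ((t + 1) * dn) 0 := by
        rw [ih _ hmL, if_neg]
        rintro ⟨-, -, h3⟩
        have : t * dn + dn ≤ t * dn := by rwa [Nat.succ_mul] at h3
        omega
      rw [hψd, hψm]
      rw [List.getD_eq_getElem?_getD, List.getElem?_set, hψlen]
      by_cases heq : (t + 1) * dn = m
      · rw [if_pos heq, if_pos (by omega)]
        subst heq
        rw [if_pos ⟨⟨t + 1, by ring⟩, by nlinarith, le_refl _⟩]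
        rfl
      · rw [if_neg heq, ← List.getD_eq_getElem?_getD, ih m hm]
        have hcond : (dn ∣ m ∧ 2 * dn ≤ m ∧ m ≤ t * dn) ↔ (dn ∣ m ∧ 2 * dn ≤ m ∧ m ≤ (t + 1) * dn) := by
          constructor
          · rintro ⟨h1, h2, h3⟩
            exact ⟨h1, h2, le_trans h3 (by nlinarith)⟩
          · rintro ⟨h1, h2, h3⟩
            refine ⟨h1, h2, ?_⟩
            obtain ⟨q, rfl⟩ := h1
            have hq : q ≤ t + 1 := by
              by_contra hq
              push Not at hq
              nlinarith
            have hq' : q ≠ t + 1 := by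
              rintro rfl; exact heq (by ring)
            calc dn * q = q * dn := by ring
              _ ≤ t * dn := Nat.mul_le_mul_right dn (by omega)
        simp only [hcond]

-- the sieve after k outer iterations
def pvSieveAux (L k : ℕ) : List Int :=
  (PySem.List.pyRange 1 ((k : Int) + 1) 1).foldl (pvSubMultiples (L : Int))
    (PySem.List.pyRange 0 ((L : Int) + 1) 1)

theorem pvSieveAux_zero (L : ℕ) : pvSieveAux L 0 = PySem.List.pyRange 0 ((L : Int) + 1) 1 := by
  unfold pvSieveAux
  rw [PySem.List.pyRange_one_eq_nil (a := 1) (by simp)]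
  rfl

theorem pvSieveAux_succ (L k : ℕ) :
    pvSieveAux L (k + 1) = pvSubMultiples (L : Int) (pvSieveAux L k) ((k : Int) + 1) := by
  unfold pvSieveAux
  have : ((k + 1 : ℕ) : Int) + 1 = ((k : Int) + 1) + 1 := by push_cast; ring
  rw [this, PySem.List.pyRange_one_succ_right (a := 1) (b := (k : Int) + 1) (by omega), List.foldl_append]
  rfl

-- the invariant: after k outer iterations phi[m] = m - Σ totient over proper divisors ≤ k
theorem pvSieveAux_invariant (L k : ℕ) (hk : k ≤ L) :
    (pvSieveAux L k).length = L + 1 ∧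
    ∀ m, m ≤ L → (pvSieveAux L k).getD m 0 =
      (m : Int) - ∑ j ∈ (Nat.properDivisors m).filter (· ≤ k), (Nat.totient j : Int) := by
  induction k with
  | zero =>
    rw [pvSieveAux_zero, PySem.List.pyRange_zero]
    have hT : ((L : Int) + 1).toNat = L + 1 := by omega
    rw [hT]
    constructor
    · simp
    · intro m hm
      rw [PySem.List.getD_map_range _ _ _ _ (by omega)]
      have hfe : (Nat.properDivisors m).filter (· ≤ 0) = ∅ := by
        rw [Finset.filter_eq_empty_iff]
        intro j hj
        have := Nat.pos_of_mem_properDivisors hj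
        omega
      rw [hfe]
      simp
  | succ k ih =>
    obtain ⟨hlen, hinv⟩ := ih (by omega)
    have hcast : ((k : Int) + 1) = ((k + 1 : ℕ) : Int) := by push_cast; ring
    rw [pvSieveAux_succ, hcast, pvSubMultiples_eq_subFold L _ (k + 1)]
    have htd : (L / (k + 1)) * (k + 1) ≤ L := Nat.div_mul_le_self L (k + 1)
    constructor
    · rw [pvSubFold_length, hlen]
    · intro m hm
      rw [pvSubFold_getD L _ hlen (k + 1) (by omega) (L / (k + 1)) htd m hm]
      have hphid : (pvSieveAux L k).getD (k + 1) 0 = ((k + 1 : ℕ).totient : Int) := by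
        rw [hinv (k + 1) (by omega)]
        have hfilter : (Nat.properDivisors (k + 1)).filter (· ≤ k) = Nat.properDivisors (k + 1) := by
          apply Finset.filter_true_of_mem
          intro j hj
          have := (Nat.mem_properDivisors.mp hj).2
          omega
        rw [hfilter]
        have hsum : (k + 1).totient + ∑ j ∈ Nat.properDivisors (k + 1), Nat.totient j = k + 1 := by
          have h1 := Nat.sum_totient (k + 1)
          rw [← Nat.insert_self_properDivisors (by omega : k + 1 ≠ 0),
            Finset.sum_insert Nat.self_notMem_properDivisors] at h1
          exact h1
        have : ((k + 1 : ℕ) : Int) = ((k + 1).totient : Int) + ∑ j ∈ Nat.properDivisors (k + 1), (Nat.totient j : Int) := by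
          exact_mod_cast congrArg (Nat.cast : ℕ → Int) hsum.symm
        rw [this]
        ring
      have hcond : ((k + 1) ∣ m ∧ 2 * (k + 1) ≤ m ∧ m ≤ (L / (k + 1)) * (k + 1)) ↔ (k + 1) ∈ Nat.properDivisors m := by
        rw [Nat.mem_properDivisors]
        constructor
        · rintro ⟨h1, h2, -⟩
          exact ⟨h1, by omega⟩
        · rintro ⟨h1, h2⟩
          obtain ⟨q, rfl⟩ := h1
          have hq2 : 2 ≤ q := by nlinarith
          refine ⟨⟨q, rfl⟩, by nlinarith, ?_⟩
          have hqle : q ≤ L / (k + 1) := (Nat.le_div_iff_mul_le (by omega)).mpr (by nlinarith)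
          calc (k + 1) * q = q * (k + 1) := by ring
            _ ≤ (L / (k + 1)) * (k + 1) := Nat.mul_le_mul_right _ hqle
      have hsplit : ∑ j ∈ (Nat.properDivisors m).filter (· ≤ k + 1), (Nat.totient j : Int)
          = (∑ j ∈ (Nat.properDivisors m).filter (· ≤ k), (Nat.totient j : Int))
            + (if (k + 1) ∈ Nat.properDivisors m then ((k + 1).totient : Int) else 0) := by
        have hu : (Nat.properDivisors m).filter (· ≤ k + 1)
            = (Nat.properDivisors m).filter (· ≤ k) ∪ (Nat.properDivisors m).filter (· = k + 1) := by
          ext j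
          simp only [Finset.mem_filter, Finset.mem_union]
          constructor
          · rintro ⟨hj, hle⟩
            rcases Nat.lt_or_ge j (k + 1) with h | h
            · exact Or.inl ⟨hj, by omega⟩
            · exact Or.inr ⟨hj, by omega⟩
          · rintro (⟨hj, hle⟩ | ⟨hj, he⟩)
            · exact ⟨hj, by omega⟩
            · exact ⟨hj, by omega⟩
        rw [hu, Finset.sum_union]
        · rw [Finset.filter_eq']
          split_ifs with hmem
          · rw [Finset.sum_singleton]
          · rw [Finset.sum_empty]
        · rw [Finset.disjoint_left]
          intro j hj1 hj2
          have h1 := (Finset.mem_filter.mp hj1).2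
          have h2 := (Finset.mem_filter.mp hj2).2
          omega
      rw [hsplit, hinv m hm, hphid]
      split_ifs with h1 h2 h3
      · ring
      · exact absurd (hcond.mp h1) h2
      · exact absurd (hcond.mpr h3) h1
      · ring

theorem pvSieve_totient (L : ℕ) (m : ℕ) (hm : m ≤ L) :
    (pvSieveAux L L).getD m 0 = (Nat.totient m : Int) := by
  obtain ⟨-, hinv⟩ := pvSieveAux_invariant L L le_rfl
  rw [hinv m hm]
  have hfilter : (Nat.properDivisors m).filter (· ≤ L) = Nat.properDivisors m := by
    apply Finset.filter_true_of_mem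
    intro j hj
    have := (Nat.mem_properDivisors.mp hj).2
    omega
  rw [hfilter]
  rcases Nat.eq_zero_or_pos m with h | h
  · subst h; simp
  · have hsum : m.totient + ∑ j ∈ Nat.properDivisors m, Nat.totient j = m := by
      have h1 := Nat.sum_totient m
      rw [← Nat.insert_self_properDivisors (by omega : m ≠ 0),
        Finset.sum_insert Nat.self_notMem_properDivisors] at h1
      exact h1
    have : ((m : ℕ) : Int) = (m.totient : Int) + ∑ j ∈ Nat.properDivisors m, (Nat.totient j : Int) := by
      exact_mod_cast congrArg (Nat.cast : ℕ → Int) hsum.symm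
    rw [this]
    ring

-- cumulative-sum folds: prefix of the accumulator splits off
theorem pvCumShift (v : Int → Int) (ds : List Int) (xs : List Int) (t : Int) :
    (ds.foldl (fun (st : List Int × Int) d => (st.1 ++ [st.2 + v d], st.2 + v d)) (xs, t))
      = (xs ++ (ds.foldl (fun (st : List Int × Int) d => (st.1 ++ [st.2 + v d], st.2 + v d)) ([], t)).1,
         (ds.foldl (fun (st : List Int × Int) d => (st.1 ++ [st.2 + v d], st.2 + v d)) ([], t)).2) := by
  induction ds generalizing xs t with
  | nil => simp
  | cons d ds ih =>
    simp only [List.foldl_cons, List.nil_append]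
    rw [ih, ih [t + v d] (t + v d)]
    simp

-- A's per-denominator inner count, named for the proofs
def pvA (d : Int) : Int :=
  (PySem.List.pyRange 1 d 1).foldl (fun phi n => if Int.gcd n d = 1 then phi + 1 else phi) (0 : Int)

-- B's sieved array, named for the proofs
def pvPhi (limit : Int) : List Int :=
  (PySem.List.pyRange 1 (limit + 1) 1).foldl (pvSubMultiples limit) (PySem.List.pyRange 0 (limit + 1) 1)

theorem pvA_shape (limit : Int) :
    get_fraction_count_series limit =
      ((PySem.List.pyRange 1 (limit + 1) 1).foldl
        (fun (st : List Int × Int) d => (st.1 ++ [st.2 + pvA d], st.2 + pvA d)) (([] : List Int), (0 : Int))).1 := rfl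

theorem pvB_shape (limit : Int) (h : ¬ limit < 1) :
    get_fraction_count_series_alt limit =
      [0] ++ ((PySem.List.pyRange 2 (limit + 1) 1).foldl
        (fun (st : List Int × Int) d => (st.1 ++ [st.2 + PySem.List.pyGetD (pvPhi limit) d 0], st.2 + PySem.List.pyGetD (pvPhi limit) d 0))
        (([] : List Int), (0 : Int))).1 := by
  unfold get_fraction_count_series_alt
  rw [if_neg h]
  rfl

theorem pvPhi_eq_sieveAux (L : ℕ) : pvPhi (L : Int) = pvSieveAux L L := rfl

theorem pvA_one : pvA 1 = 0 := by
  unfold pvA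
  rw [PySem.List.pyRange_one_eq_nil le_rfl]
  rfl

-- ===== VERDICT (by name: the statement is the Claim_ definition above) =====
theorem get_fraction_count_series_spec : Claim_equal_get_fraction_count_series := by
  intro limit _
  unfold Spec_get_fraction_count_series
  by_cases hneg : limit < 1
  · unfold get_fraction_count_series get_fraction_count_series_alt
    rw [if_pos hneg, PySem.List.pyRange_one_eq_nil (a := 1) (by omega)]
    rfl
  · obtain ⟨L, rfl⟩ : ∃ L : ℕ, limit = (L : Int) := ⟨limit.toNat, by omega⟩
    rw [pvA_shape, pvB_shape _ hneg]
    rw [PySem.List.pyRange_one_cons (a := 1) (by omega)]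
    rw [List.foldl_cons]
    have hinit : ((([] : List Int) ++ [(0 : Int) + pvA 1], (0 : Int) + pvA 1)) = (([0] : List Int), (0 : Int)) := by
      rw [pvA_one]; rfl
    rw [hinit]
    have h11 : (1 : Int) + 1 = 2 := rfl
    rw [h11]
    rw [pvCumShift pvA (PySem.List.pyRange 2 ((L : Int) + 1) 1) [0] 0]
    have hcongr : (PySem.List.pyRange 2 ((L : Int) + 1) 1).foldl
        (fun (st : List Int × Int) d => (st.1 ++ [st.2 + pvA d], st.2 + pvA d)) (([] : List Int), (0 : Int))
      = (PySem.List.pyRange 2 ((L : Int) + 1) 1).foldl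
        (fun (st : List Int × Int) d => (st.1 ++ [st.2 + PySem.List.pyGetD (pvPhi (L : Int)) d 0], st.2 + PySem.List.pyGetD (pvPhi (L : Int)) d 0))
        (([] : List Int), (0 : Int)) := by
      apply PySem.List.foldl_congr_mem
      intro acc d hd
      have hdb := PySem.List.mem_pyRange_one.mp hd
      obtain ⟨dn, rfl⟩ : ∃ dn : ℕ, d = (dn : Int) := ⟨d.toNat, by omega⟩
      have hdn2 : 2 ≤ dn := by exact_mod_cast hdb.1
      have hdnL : dn ≤ L := by
        have := hdb.2
        omega
      have hv : pvA (dn : Int) = PySem.List.pyGetD (pvPhi (L : Int)) (dn : Int) 0 := by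
        rw [PySem.List.pyGetD_natCast, pvPhi_eq_sieveAux, pvSieve_totient L dn hdnL]
        exact countA_eq dn hdn2
      rw [hv]
    rw [hcongr]
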